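-- pv_equiv track=rewrite | github.com/ginjack2002-creator/cast-science-resources | scripts/audit_conditional_relationships.py | find_shared_targets
-- ===== SOURCE A (Python) =====
-- from collections import defaultdict
--
-- def find_shared_targets(relationships):
--     """Find components that receive 2+ input arrows."""
--     target_sources = defaultdict(list)
--     for rel in relationships:
--         target_sources[rel["target"]].append(rel)
--
--     shared = {}
--     for target, rels in target_sources.items():
--         if len(rels) >= 2:
--             shared[target] = rels
--
--     return shared
-- ===== SOURCE B (Python) =====
-- def find_shared_targets(relationships):
--     """Find components that receive 2+ input arrows."""
--     shared = {}
--     for rel in relationships: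
--         t = rel["target"]
--         if t not in shared:
--             rels = [r for r in relationships if r["target"] == t]
--             if len(rels) >= 2:
--                 shared[t] = rels
--     return shared
-- ===== Notes on version B (the rewrite author's own statement) =====
-- stated objective: alternative
-- what changed: Replaces the defaultdict group-all-then-filter two-phase pass with a single loop that, at each target's first occurrence, gathers that target's relationships by a direct scan of the input and keeps the group only if it has 2+ members (no intermediate dict of all groups).
import Mathlib
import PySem

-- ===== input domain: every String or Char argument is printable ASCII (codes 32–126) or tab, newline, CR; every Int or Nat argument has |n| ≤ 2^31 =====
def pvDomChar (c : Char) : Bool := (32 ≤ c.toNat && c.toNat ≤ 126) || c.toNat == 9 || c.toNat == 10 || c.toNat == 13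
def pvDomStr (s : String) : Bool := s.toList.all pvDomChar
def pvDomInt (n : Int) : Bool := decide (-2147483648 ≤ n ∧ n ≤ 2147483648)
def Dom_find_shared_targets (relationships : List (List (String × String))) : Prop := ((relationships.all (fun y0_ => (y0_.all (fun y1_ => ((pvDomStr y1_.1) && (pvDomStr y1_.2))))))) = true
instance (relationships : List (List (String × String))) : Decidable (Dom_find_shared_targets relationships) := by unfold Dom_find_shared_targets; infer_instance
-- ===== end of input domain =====

-- B is an alternative implementation: one loop that, at each target's first occurrence,
-- gathers that target's group by a direct scan of the input (no intermediate dict of all groups).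

-- rel["target"] (Pre_ guarantees the key is present, so the "" default is never consulted there)
def pvKey (rel : List (String × String)) : String := (rel.lookup "target").getD ""

-- ===== PORT A =====
def find_shared_targets (relationships : List (List (String × String))) : List (String × List (List (String × String))) :=
  let target_sources :=
    relationships.foldl (fun d rel => d.modify (pvKey rel) [] (· ++ [rel])) PySem.Dict.empty
  (target_sources.items.foldl
    (fun shared p => if 2 ≤ p.2.length then shared.insert p.1 p.2 else shared)
    PySem.Dict.empty).items

-- ===== PORT B =====
def find_shared_targets_alt (relationships : List (List (String × String))) : List (String × List (List (String × String))) :=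
  (relationships.foldl
    (fun shared rel =>
      let t := pvKey rel
      if shared.contains t then shared
      else
        let rels := relationships.filter (fun r => pvKey r == t)
        if 2 ≤ rels.length then shared.insert t rels else shared)
    PySem.Dict.empty).items

-- ===== PRECONDITION & SPEC =====
-- Pre_: every relationship dict has the key "target"; on any other input the Python A
-- (and B alike) raises KeyError at rel["target"].
def Pre_find_shared_targets (relationships : List (List (String × String))) : Prop :=
  ∀ rel ∈ relationships, "target" ∈ rel.map Prod.fst
instance (relationships : List (List (String × String))) : Decidable (Pre_find_shared_targets relationships) := by unfold Pre_find_shared_targets; infer_instance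

def pvWitness_find_shared_targets : (List (List (String × String))) :=
  [[("target", "a"), ("src", "x")], [("target", "b")], [("target", "a"), ("src", "y")]]

def Spec_find_shared_targets (relationships : List (List (String × String))) (out : List (String × List (List (String × String)))) : Prop := out = find_shared_targets_alt relationships
instance (relationships : List (List (String × String))) (out : List (String × List (List (String × String)))) : Decidable (Spec_find_shared_targets relationships out) := by unfold Spec_find_shared_targets; infer_instance

-- ===== CLAIM (what is proved, stated in full; the proofs are below) =====
def Claim_equal_find_shared_targets : Prop := ∀ (relationships : List (List (String × String))), Dom_find_shared_targets relationships → Pre_find_shared_targets relationships → Spec_find_shared_targets relationships (find_shared_targets relationships)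

-- ===== LEMMAS AND PROOFS =====

-- the group of relationships whose "target" is k
def pvF (L : List (List (String × String))) (k : String) : List (List (String × String)) :=
  L.filter (fun r => pvKey r == k)

-- the common normal form: targets of pref in first-occurrence order whose group in L has 2+ members
def pvItems (L pref : List (List (String × String))) : List (String × List (List (String × String))) :=
  ((PySem.Set.ofList (pref.map pvKey)).filter (fun k => 2 ≤ (pvF L k).length)).map
    (fun k => (k, pvF L k))

-- A's first loop: the grouping dict's items, characterised
theorem groupItems (L : List (List (String × String))) :
    (L.foldl (fun d rel => d.modify (pvKey rel) [] (· ++ [rel])) PySem.Dict.empty).items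
      = (PySem.Set.ofList (L.map pvKey)).map (fun k => (k, pvF L k)) := by
  set d := L.foldl (fun d rel => d.modify (pvKey rel) [] (· ++ [rel])) PySem.Dict.empty with hd
  have hnd : d.keys.Nodup := by
    rw [hd]
    exact PySem.Dict.nodup_keys_foldl_modify_key L pvKey [] (fun d rel => (· ++ [rel])) _ PySem.Dict.nodup_keys_empty
  have hkeys : d.keys = PySem.Set.ofList (L.map pvKey) := by
    rw [hd, PySem.Dict.keys_foldl_modify_key]
    simp [PySem.Set.update_nil_left]
  have hget : ∀ k, d.getD k [] = pvF L k := by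
    intro k
    have : d = (L.map (fun r => (pvKey r, r))).foldl (fun d p => d.modify p.1 [] (· ++ [p.2])) PySem.Dict.empty := by
      rw [hd, List.foldl_map]
    rw [this, PySem.Dict.getD_foldl_modify_append]
    simp [pvF, List.filter_map, List.map_map, Function.comp_def]
  rw [PySem.Dict.items_eq_map_keys d hnd [], hkeys]
  exact List.map_congr_left (fun k _ => by rw [hget])

-- A's second loop: inserting pairs with pairwise-distinct fresh keys appends the kept ones
theorem insFold (ps : List (String × List (List (String × String)))) :
    ∀ (d : PySem.Dict String (List (List (String × String)))),
    (ps.map Prod.fst).Nodup → (∀ p ∈ ps, d.contains p.1 = false) →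
    (ps.foldl (fun sh p => if 2 ≤ p.2.length then sh.insert p.1 p.2 else sh) d).items
      = d.items ++ ps.filter (fun p => 2 ≤ p.2.length) := by
  induction ps with
  | nil => simp
  | cons p ps ih =>
    intro d hnd hfresh
    simp only [List.map_cons, List.nodup_cons] at hnd
    simp only [List.foldl_cons, List.filter_cons]
    by_cases hl : 2 ≤ p.2.length
    · rw [if_pos hl]
      have hf : ∀ q ∈ ps, (d.insert p.1 p.2).contains q.1 = false := by
        intro q hq
        rw [PySem.Dict.contains_insert]
        have : q.1 ≠ p.1 := fun h => hnd.1 (h ▸ List.mem_map_of_mem hq)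
        simp [this, hfresh q (List.mem_cons_of_mem _ hq)]
      rw [ih (d.insert p.1 p.2) hnd.2 hf,
          PySem.Dict.items_insert_of_not_contains (h := hfresh p (List.mem_cons_self ..))]
      simp [hl]
    · rw [if_neg hl, ih d hnd.2 (fun q hq => hfresh q (List.mem_cons_of_mem _ hq))]
      simp [hl]

-- B's loop invariant: after a prefix, the dict holds exactly pvItems of that prefix
theorem bFold (L : List (List (String × String))) : ∀ (l pref : List (List (String × String))),
    (l.foldl (fun shared rel =>
        let t := pvKey rel
        if shared.contains t then shared
        else
          let rels := L.filter (fun r => pvKey r == t)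
          if 2 ≤ rels.length then shared.insert t rels else shared)
      (PySem.Dict.mk (pvItems L pref))).items = pvItems L (pref ++ l) := by
  intro l
  induction l with
  | nil => intro pref; simp
  | cons rel l ih =>
    intro pref
    have hstep :
        (if (PySem.Dict.mk (pvItems L pref)).contains (pvKey rel) = true
          then PySem.Dict.mk (pvItems L pref)
          else if 2 ≤ (L.filter (fun r => pvKey r == pvKey rel)).length
            then (PySem.Dict.mk (pvItems L pref)).insert (pvKey rel) (L.filter (fun r => pvKey r == pvKey rel))
            else PySem.Dict.mk (pvItems L pref))
        = PySem.Dict.mk (pvItems L (pref ++ [rel])) := by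
      have hS : PySem.Set.ofList ((pref ++ [rel]).map pvKey)
          = PySem.Set.add (PySem.Set.ofList (pref.map pvKey)) (pvKey rel) := by
        rw [show (pref ++ [rel]).map pvKey = pref.map pvKey ++ [pvKey rel] by simp,
            PySem.Set.ofList_append_singleton]
      have hkeys : (PySem.Dict.mk (pvItems L pref)).keys
          = (PySem.Set.ofList (pref.map pvKey)).filter (fun k => 2 ≤ (pvF L k).length) := by
        simp [pvItems, PySem.Dict.keys, List.map_map, Function.comp_def]
      have hc : (PySem.Dict.mk (pvItems L pref)).contains (pvKey rel)
          = decide ((pvKey rel) ∈ (PySem.Set.ofList (pref.map pvKey)).filter (fun k => 2 ≤ (pvF L k).length)) := by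
        rw [PySem.Dict.contains_eq_decide_mem_keys, hkeys]
      by_cases hmem : (pvKey rel) ∈ (PySem.Set.ofList (pref.map pvKey)).filter (fun k => 2 ≤ (pvF L k).length)
      · have hcT : (PySem.Dict.mk (pvItems L pref)).contains (pvKey rel) = true := by
          rw [hc]; exact decide_eq_true hmem
        rw [if_pos hcT]
        have htS : (pvKey rel) ∈ PySem.Set.ofList (pref.map pvKey) := (List.mem_filter.mp hmem).1
        congr 1
        simp only [pvItems, hS, PySem.Set.add_of_mem htS]
      · have hcF : ¬ ((PySem.Dict.mk (pvItems L pref)).contains (pvKey rel) = true) := by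
          rw [hc]; simp [hmem]
        rw [if_neg hcF]
        by_cases hP : 2 ≤ (pvF L (pvKey rel)).length
        · have htS : (pvKey rel) ∉ PySem.Set.ofList (pref.map pvKey) := by
            intro h; exact hmem (List.mem_filter.mpr ⟨h, by simpa using hP⟩)
          simp only [pvF] at hP
          rw [if_pos hP]
          apply PySem.Dict.ext
          rw [PySem.Dict.items_insert_of_not_contains
                (h := Bool.not_eq_true _ ▸ eq_false_of_ne_true hcF)]
          simp only [pvItems]
          rw [hS, PySem.Set.add_of_not_mem htS, List.filter_append, List.map_append]
          congr 1
          simp only [List.filter_cons, List.filter_nil]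
          rw [if_pos (by simpa [pvF] using hP)]
          simp [pvF]
        · simp only [pvF] at hP
          rw [if_neg hP]
          congr 1
          simp only [pvItems, hS]
          congr 1
          by_cases htS : (pvKey rel) ∈ PySem.Set.ofList (pref.map pvKey)
          · rw [PySem.Set.add_of_mem htS]
          · rw [PySem.Set.add_of_not_mem htS, List.filter_append]
            simp only [List.filter_cons, List.filter_nil]
            rw [if_neg (by simpa [pvF] using hP)]
            simp
    rw [List.foldl_cons]
    show (l.foldl _ (if (PySem.Dict.mk (pvItems L pref)).contains (pvKey rel) = true
          then PySem.Dict.mk (pvItems L pref)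
          else if 2 ≤ (L.filter (fun r => pvKey r == pvKey rel)).length
            then (PySem.Dict.mk (pvItems L pref)).insert (pvKey rel) (L.filter (fun r => pvKey r == pvKey rel))
            else PySem.Dict.mk (pvItems L pref))).items = _
    rw [hstep, ih (pref ++ [rel]), List.append_assoc]
    rfl

theorem canonA (L : List (List (String × String))) : find_shared_targets L = pvItems L L := by
  show ((L.foldl (fun d rel => d.modify (pvKey rel) [] (· ++ [rel])) PySem.Dict.empty).items.foldl
      (fun shared p => if 2 ≤ p.2.length then shared.insert p.1 p.2 else shared)
      PySem.Dict.empty).items = pvItems L L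
  rw [groupItems L]
  rw [insFold _ PySem.Dict.empty
        (by simp [List.map_map, Function.comp_def, PySem.Set.nodup_ofList])
        (by intro p _; exact PySem.Dict.contains_empty ..)]
  rw [show (PySem.Dict.empty : PySem.Dict String (List (List (String × String)))).items = [] from rfl]
  rw [List.filter_map]
  simp [pvItems, Function.comp_def]

theorem canonB (L : List (List (String × String))) : find_shared_targets_alt L = pvItems L L := by
  have h := bFold L L []
  simpa using h

-- ===== VERDICT (by name: the statement is the Claim_ definition above) =====
theorem find_shared_targets_spec : Claim_equal_find_shared_targets := by
  intro L _ _
  unfold Spec_find_shared_targets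
  rw [canonA, canonB]
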